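-- pv_equiv track=rewrite | github.com/HeadHunter483/msu-ling | Syntax/Release/utilites/morph.py | adj_morph
-- ===== SOURCE A (Python) =====
-- def adj_morph(string):
--     str5=""
--     word = string.split()
--     mas=[]
--     mas2=[]
--
--     for current_word in word:
--         mas.append(current_word.lower())
--
--     while(len(mas2)!=6):
--         mas2.append("-")
--
--     for s in mas:
--         if (s=='nom' or s=='gen' or s=='dat' or s=='acc' or s=='ins' or s=='loc'):
--             mas2[1]=s
--         if (s=='sg' or s=='pl'):
--             mas2[2]=s
--         if (s=='plen' or s=='brev'):
--             mas2[3]=s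
--         if (s=='f' or s=='m' or s=='n'):
--             mas2[4]=s
--         if (s=='inan' or s=='anim'):
--             mas2[5]=s
--
--     for i in range(len(mas2)):
--         str5=str5+' '+mas2[i]
--
--     return str5
-- ===== SOURCE B (Python) =====
-- _CATS = [
--     ('nom', 'gen', 'dat', 'acc', 'ins', 'loc'),
--     ('sg', 'pl'),
--     ('plen', 'brev'),
--     ('f', 'm', 'n'),
--     ('inan', 'anim'),
-- ]
--
--
-- def adj_morph(string):
--     words = [w.lower() for w in reversed(string.split())]
--
--     def pick(valid):
--         for w in words:
--             if w in valid:
--                 return w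
--         return '-'
--
--     return ' ' + ' '.join(['-'] + [pick(valid) for valid in _CATS])
-- ===== Notes on version B (the rewrite author's own statement) =====
-- stated objective: simpler
-- what changed: Replaces A's mutable 6-slot list updated by index-assignments in one forward pass (plus a while-append initialisation loop and an index-based concatenation loop) with a fixed category table: each of the five categories picks its word by a first-match scan over the reversed lowered word list (equivalent to taking the last match), and the output is built by a single join with a leading dash slot.
import Mathlib
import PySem

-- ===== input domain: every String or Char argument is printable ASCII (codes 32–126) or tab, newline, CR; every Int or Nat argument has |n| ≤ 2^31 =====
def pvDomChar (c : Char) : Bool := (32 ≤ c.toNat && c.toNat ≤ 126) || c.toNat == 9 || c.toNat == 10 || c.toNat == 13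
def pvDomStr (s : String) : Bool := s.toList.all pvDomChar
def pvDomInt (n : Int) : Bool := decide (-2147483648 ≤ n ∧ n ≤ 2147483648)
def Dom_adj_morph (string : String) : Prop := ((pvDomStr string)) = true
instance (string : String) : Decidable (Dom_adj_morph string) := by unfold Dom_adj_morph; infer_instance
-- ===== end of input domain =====

-- B is a simpler decomposition: fixed category table, first match over the reversed word
-- list per category (instead of A's index-assignment fold), then a single join.

-- ===== PORT A =====
def adjMorphStep (mas2 : List String) (s : String) : List String :=
  let mas2 := if s == "nom" || s == "gen" || s == "dat" || s == "acc" || s == "ins" || s == "loc" then mas2.set 1 s else mas2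
  let mas2 := if s == "sg" || s == "pl" then mas2.set 2 s else mas2
  let mas2 := if s == "plen" || s == "brev" then mas2.set 3 s else mas2
  let mas2 := if s == "f" || s == "m" || s == "n" then mas2.set 4 s else mas2
  if s == "inan" || s == "anim" then mas2.set 5 s else mas2

def adj_morph (string : String) : String :=
  let word := PySem.Str.split₀ string
  let mas := word.foldl (fun acc w => acc ++ [PySem.Str.lower w]) []
  -- while len(mas2)!=6: mas2.append('-')  — starting from [], appends '-' exactly 6 times
  let mas2 := (List.range 6).foldl (fun acc _ => acc ++ ["-"]) ([] : List String)
  let mas2 := mas.foldl adjMorphStep mas2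
  (PySem.List.pyRange 0 mas2.length 1).foldl
    (fun str5 i => str5 ++ " " ++ PySem.List.pyGetD mas2 i "") ""

-- ===== PORT B =====
def pvCats : List (List String) :=
  [["nom", "gen", "dat", "acc", "ins", "loc"],
   ["sg", "pl"],
   ["plen", "brev"],
   ["f", "m", "n"],
   ["inan", "anim"]]

def pvPick : List String → List String → String
  | [], _ => "-"
  | w :: ws, valid => if w ∈ valid then w else pvPick ws valid

def adj_morph_alt (string : String) : String :=
  let words := (PySem.Str.split₀ string).reverse.map PySem.Str.lower
  " " ++ PySem.Str.join " " ("-" :: pvCats.map (fun valid => pvPick words valid))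

-- ===== PRECONDITION & SPEC =====
def Spec_adj_morph (string : String) (out : String) : Prop := out = adj_morph_alt string
instance (string : String) (out : String) : Decidable (Spec_adj_morph string out) := by unfold Spec_adj_morph; infer_instance

-- ===== CLAIM (what is proved, stated in full; the proofs are below) =====
def Claim_equal_adj_morph : Prop := ∀ (string : String), Dom_adj_morph string → Spec_adj_morph string (adj_morph string)

-- ===== LEMMAS AND PROOFS =====

-- pvPick with an arbitrary default, to carry the accumulator through the induction
def pvPickD (d : String) : List String → List String → String
  | [], _ => d
  | w :: ws, valid => if w ∈ valid then w else pvPickD d ws valid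

theorem pvPick_eq_pickD (ws valid : List String) : pvPick ws valid = pvPickD "-" ws valid := by
  induction ws with
  | nil => rfl
  | cons w t ih => simp [pvPick, pvPickD, ih]

theorem pvPickD_append (d : String) (l : List String) (w : String) (valid : List String) :
    pvPickD d (l ++ [w]) valid = pvPickD (if w ∈ valid then w else d) l valid := by
  induction l with
  | nil => rfl
  | cons x t ih => simp [pvPickD, ih]

theorem adjMorphStep_fold (ws : List String) (a1 a2 a3 a4 a5 : String) :
    ws.foldl adjMorphStep ["-", a1, a2, a3, a4, a5] =
      ["-",
       pvPickD a1 ws.reverse ["nom", "gen", "dat", "acc", "ins", "loc"],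
       pvPickD a2 ws.reverse ["sg", "pl"],
       pvPickD a3 ws.reverse ["plen", "brev"],
       pvPickD a4 ws.reverse ["f", "m", "n"],
       pvPickD a5 ws.reverse ["inan", "anim"]] := by
  induction ws generalizing a1 a2 a3 a4 a5 with
  | nil => rfl
  | cons w t ih =>
    have hstep : adjMorphStep ["-", a1, a2, a3, a4, a5] w =
        ["-",
         if w ∈ ["nom", "gen", "dat", "acc", "ins", "loc"] then w else a1,
         if w ∈ ["sg", "pl"] then w else a2,
         if w ∈ ["plen", "brev"] then w else a3,
         if w ∈ ["f", "m", "n"] then w else a4,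
         if w ∈ ["inan", "anim"] then w else a5] := by
      simp only [adjMorphStep, List.mem_cons, List.not_mem_nil, or_false, beq_iff_eq,
        Bool.or_eq_true, List.set]
      split_ifs <;> simp_all
    simp only [List.foldl_cons, hstep, ih, List.reverse_cons, pvPickD_append]

theorem pvJoin_eq (p1 p2 p3 p4 p5 : String) :
    List.foldl (fun a x => a ++ " " ++ x) "" ["-", p1, p2, p3, p4, p5] =
    " " ++ PySem.Str.join " " ["-", p1, p2, p3, p4, p5] := by
  have h : ∀ a b : String, a.toList = b.toList → a = b := by
    intro a b hab
    have := congrArg String.ofList hab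
    simpa using this
  apply h
  simp [PySem.Str.join, PySem.Chars.join, List.intercalate]

-- ===== VERDICT (by name: the statement is the Claim_ definition above) =====
set_option maxHeartbeats 1000000 in
theorem adj_morph_spec : Claim_equal_adj_morph := by
  intro string _
  unfold Spec_adj_morph adj_morph adj_morph_alt
  simp only [PySem.List.foldl_append_singleton_eq_map, List.nil_append]
  rw [show List.map (fun _ : Nat => ("-" : String)) (List.range 6) =
        ["-", "-", "-", "-", "-", "-"] from rfl]
  rw [adjMorphStep_fold]
  rw [PySem.List.foldl_pyRange_zero_pyGetD']
  simp only [List.map_reverse, pvCats, List.map_cons, List.map_nil, ← pvPick_eq_pickD]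
  rw [pvJoin_eq]
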